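-- pv_equiv track=rewrite | github.com/epfl-ada/ada-2022-project-toestewbrr | extraction.py | get_character_description
-- ===== SOURCE A (Python) =====
-- AGENT_VERBS = ['nsubj', 'obl:agent', 'obl']
--
-- PATIENT_VERBS = ['nsubj:pass', 'nsubj:xsubj', 'obj', "obl:as", "obl:with", "obl:by", 'obl:after', "obl:of", "obl:in", "obl:from"]
--
-- ATTRIBUTE_TYPES = ['appos', 'amod', 'nmod', 'nmod:poss', 'nmod:of', 'nmod:to', 'nmod:for', 'nmod:at', 'nmod:as', 'nmod:such_as', 'nmod:in', 'nmod:on', 'nmod:about', 'nmod:about']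
--
-- def split_description(description_pairs):
--     ''' Split the description pairs by relation types: {agent verb, patient verb, attribute}.'''
--     agent_verbs = []
--     patient_verbs = []
--     attributes = []
--
--     for pair in description_pairs:
--         if pair[2] in AGENT_VERBS:
--             agent_verbs.append(pair[:2])
--         elif pair[2] in PATIENT_VERBS:
--             patient_verbs.append(pair[:2])
--         elif pair[2] in ATTRIBUTE_TYPES:
--             attributes.append(pair[:2])
--
--     return agent_verbs, patient_verbs, attributes
--
-- def get_character_description(descriptions_pairs):
--     ''' Given a xml file parsed into a tree, extracts all depparse annotations (subject, object, relation_type)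
--     and store them in a dictionary of dictionaries:
--         {character_full_name : {agent_verbs : [...], patient_verbs : [...], attributes : [...]}}
--     '''
--     descriptions_dict = {}
--     agent_verbs, patient_verbs, attributes = split_description(descriptions_pairs)
--     for (char, verb) in agent_verbs:
--         if char not in descriptions_dict:
--             descriptions_dict[char] = {'agent_verbs': [verb], 'patient_verbs': [], 'attributes': []}
--         else:
--             descriptions_dict[char]['agent_verbs'].append(verb)
--
--     for (char, verb) in patient_verbs:
--         if char not in descriptions_dict:
--             descriptions_dict[char] = {'agent_verbs': [], 'patient_verbs': [verb], 'attributes': []}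
--         else:
--             descriptions_dict[char]['patient_verbs'].append(verb)
--
--     for (char, attr) in attributes:
--         if char not in descriptions_dict:
--             descriptions_dict[char] = {'agent_verbs': [], 'patient_verbs': [], 'attributes': [attr]}
--         else:
--             descriptions_dict[char]['attributes'].append(attr)
--     return descriptions_dict
-- ===== SOURCE B (Python) =====
-- AGENT_VERBS = ['nsubj', 'obl:agent', 'obl']
--
-- PATIENT_VERBS = ['nsubj:pass', 'nsubj:xsubj', 'obj', "obl:as", "obl:with", "obl:by", 'obl:after', "obl:of", "obl:in", "obl:from"]
--
-- ATTRIBUTE_TYPES = ['appos', 'amod', 'nmod', 'nmod:poss', 'nmod:of', 'nmod:to', 'nmod:for', 'nmod:at', 'nmod:as', 'nmod:such_as', 'nmod:in', 'nmod:on', 'nmod:about', 'nmod:about']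
--
--
-- def get_character_description(descriptions_pairs):
--     '''One doubly-nested loop with setdefault instead of split_description plus three
--     insert-or-append loops.'''
--     descriptions_dict = {}
--     for kind, relations in (('agent_verbs', AGENT_VERBS),
--                             ('patient_verbs', PATIENT_VERBS),
--                             ('attributes', ATTRIBUTE_TYPES)):
--         for char, value, relation in descriptions_pairs:
--             if relation in relations:
--                 entry = descriptions_dict.setdefault(
--                     char, {'agent_verbs': [], 'patient_verbs': [], 'attributes': []})
--                 entry[kind].append(value)
--     return descriptions_dict
-- ===== Notes on version B (the rewrite author's own statement) =====
-- stated objective: simpler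
-- what changed: Replaced split_description plus three separate insert-or-append loops (each rebuilding the per-character entry) with a single doubly-nested loop over (kind, relation-list) categories that uses dict.setdefault and appends directly into the right list.
import Mathlib
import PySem

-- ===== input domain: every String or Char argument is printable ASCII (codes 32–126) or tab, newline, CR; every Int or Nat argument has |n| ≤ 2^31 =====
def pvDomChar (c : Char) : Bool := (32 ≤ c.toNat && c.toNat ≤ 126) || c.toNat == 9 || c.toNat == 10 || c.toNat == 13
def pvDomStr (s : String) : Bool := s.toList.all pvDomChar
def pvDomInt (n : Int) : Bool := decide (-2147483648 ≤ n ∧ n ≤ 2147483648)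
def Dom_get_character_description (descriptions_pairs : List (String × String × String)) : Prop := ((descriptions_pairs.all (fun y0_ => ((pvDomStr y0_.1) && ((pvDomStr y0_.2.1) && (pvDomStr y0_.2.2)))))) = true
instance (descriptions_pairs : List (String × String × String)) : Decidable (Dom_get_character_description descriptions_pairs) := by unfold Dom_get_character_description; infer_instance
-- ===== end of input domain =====

-- B replaces split_description plus three insert-or-append loops by one doubly-nested
-- setdefault loop over (kind, relation-list) categories; objective: simpler, same result.

-- ===== PORT A =====
def AGENT_VERBS : List String := ["nsubj", "obl:agent", "obl"]

def PATIENT_VERBS : List String := ["nsubj:pass", "nsubj:xsubj", "obj", "obl:as", "obl:with", "obl:by", "obl:after", "obl:of", "obl:in", "obl:from"]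

def ATTRIBUTE_TYPES : List String := ["appos", "amod", "nmod", "nmod:poss", "nmod:of", "nmod:to", "nmod:for", "nmod:at", "nmod:as", "nmod:such_as", "nmod:in", "nmod:on", "nmod:about", "nmod:about"]

def split_description (description_pairs : List (String × String × String)) :
    List (String × String) × List (String × String) × List (String × String) :=
  description_pairs.foldl
    (fun acc pair =>
      if AGENT_VERBS.contains pair.2.2 then
        (acc.1 ++ [(pair.1, pair.2.1)], acc.2.1, acc.2.2)
      else if PATIENT_VERBS.contains pair.2.2 then
        (acc.1, acc.2.1 ++ [(pair.1, pair.2.1)], acc.2.2)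
      else if ATTRIBUTE_TYPES.contains pair.2.2 then
        (acc.1, acc.2.1, acc.2.2 ++ [(pair.1, pair.2.1)])
      else acc)
    ([], [], [])

def get_character_description (descriptions_pairs : List (String × String × String)) : List (String × List (String × List String)) :=
  let d0 : PySem.Dict String (PySem.Dict String (List String)) := PySem.Dict.empty
  let s := split_description descriptions_pairs
  let d1 := s.1.foldl
    (fun d cv =>
      if d.contains cv.1 = false then
        d.insert cv.1 (PySem.Dict.ofList [("agent_verbs", [cv.2]), ("patient_verbs", []), ("attributes", [])])
      else
        d.modify cv.1 PySem.Dict.empty (fun inner => inner.modify "agent_verbs" [] (· ++ [cv.2]))) d0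
  let d2 := s.2.1.foldl
    (fun d cv =>
      if d.contains cv.1 = false then
        d.insert cv.1 (PySem.Dict.ofList [("agent_verbs", []), ("patient_verbs", [cv.2]), ("attributes", [])])
      else
        d.modify cv.1 PySem.Dict.empty (fun inner => inner.modify "patient_verbs" [] (· ++ [cv.2]))) d1
  let d3 := s.2.2.foldl
    (fun d cv =>
      if d.contains cv.1 = false then
        d.insert cv.1 (PySem.Dict.ofList [("agent_verbs", []), ("patient_verbs", []), ("attributes", [cv.2])])
      else
        d.modify cv.1 PySem.Dict.empty (fun inner => inner.modify "attributes" [] (· ++ [cv.2]))) d2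
  d3.items.map (fun p => (p.1, p.2.items))

-- ===== PORT B =====
def pvFresh : PySem.Dict String (List String) :=
  PySem.Dict.ofList [("agent_verbs", []), ("patient_verbs", []), ("attributes", [])]

def get_character_description_alt (descriptions_pairs : List (String × String × String)) : List (String × List (String × List String)) :=
  let d := [("agent_verbs", AGENT_VERBS), ("patient_verbs", PATIENT_VERBS), ("attributes", ATTRIBUTE_TYPES)].foldl
    (fun d kr =>
      descriptions_pairs.foldl
        (fun d p =>
          if kr.2.contains p.2.2 then
            (d.setdefault p.1 pvFresh).modify p.1 pvFresh
              (fun entry => entry.modify kr.1 [] (· ++ [p.2.1]))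
          else d)
        d)
    (PySem.Dict.empty : PySem.Dict String (PySem.Dict String (List String)))
  d.items.map (fun p => (p.1, p.2.items))

-- ===== PRECONDITION & SPEC =====
def Spec_get_character_description (descriptions_pairs : List (String × String × String)) (out : List (String × List (String × List String))) : Prop := out = get_character_description_alt descriptions_pairs
instance (descriptions_pairs : List (String × String × String)) (out : List (String × List (String × List String))) : Decidable (Spec_get_character_description descriptions_pairs out) := by unfold Spec_get_character_description; infer_instance

-- ===== CLAIM (what is proved, stated in full; the proofs are below) =====
def Claim_equal_get_character_description : Prop := ∀ (descriptions_pairs : List (String × String × String)), Dom_get_character_description descriptions_pairs → Spec_get_character_description descriptions_pairs (get_character_description descriptions_pairs)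

-- ===== LEMMAS AND PROOFS =====

-- the categories are pairwise disjoint, so A's elif chain tests plain membership
theorem pv_disj_PA : ∀ r ∈ PATIENT_VERBS, AGENT_VERBS.contains r = false := by decide
theorem pv_disj_TA : ∀ r ∈ ATTRIBUTE_TYPES, AGENT_VERBS.contains r = false := by decide
theorem pv_disj_TP : ∀ r ∈ ATTRIBUTE_TYPES, PATIENT_VERBS.contains r = false := by decide

-- split_description's fold, from arbitrary accumulators, appends the three filtered projections
theorem pv_split_foldl (ps : List (String × String × String))
    (a b c : List (String × String)) :
    ps.foldl
      (fun acc pair =>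
        if AGENT_VERBS.contains pair.2.2 then
          (acc.1 ++ [(pair.1, pair.2.1)], acc.2.1, acc.2.2)
        else if PATIENT_VERBS.contains pair.2.2 then
          (acc.1, acc.2.1 ++ [(pair.1, pair.2.1)], acc.2.2)
        else if ATTRIBUTE_TYPES.contains pair.2.2 then
          (acc.1, acc.2.1, acc.2.2 ++ [(pair.1, pair.2.1)])
        else acc)
      (a, b, c)
    = (a ++ (ps.filter (fun p => AGENT_VERBS.contains p.2.2)).map (fun p => (p.1, p.2.1)),
       b ++ (ps.filter (fun p => PATIENT_VERBS.contains p.2.2)).map (fun p => (p.1, p.2.1)),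
       c ++ (ps.filter (fun p => ATTRIBUTE_TYPES.contains p.2.2)).map (fun p => (p.1, p.2.1))) := by
  induction ps generalizing a b c with
  | nil => simp
  | cons p ps ih =>
    by_cases hA : p.2.2 ∈ AGENT_VERBS
    · have hP : p.2.2 ∉ PATIENT_VERBS := fun h => by
        have h2 : AGENT_VERBS.contains p.2.2 = true := List.contains_iff_mem.mpr hA
        rw [pv_disj_PA p.2.2 h] at h2; exact Bool.noConfusion h2
      have hT : p.2.2 ∉ ATTRIBUTE_TYPES := fun h => by
        have h2 : AGENT_VERBS.contains p.2.2 = true := List.contains_iff_mem.mpr hA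
        rw [pv_disj_TA p.2.2 h] at h2; exact Bool.noConfusion h2
      simp only [List.foldl_cons]
      rw [if_pos (List.contains_iff_mem.mpr hA), ih]
      simp [hA, hP, hT]
    · by_cases hP : p.2.2 ∈ PATIENT_VERBS
      · have hT : p.2.2 ∉ ATTRIBUTE_TYPES := fun h => by
          have h2 : PATIENT_VERBS.contains p.2.2 = true := List.contains_iff_mem.mpr hP
          rw [pv_disj_TP p.2.2 h] at h2; exact Bool.noConfusion h2
        simp only [List.foldl_cons]
        rw [if_neg (by simp [hA]),
            if_pos (List.contains_iff_mem.mpr hP), ih]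
        simp [hA, hP, hT]
      · by_cases hT : p.2.2 ∈ ATTRIBUTE_TYPES
        · simp only [List.foldl_cons]
          rw [if_neg (by simp [hA]),
              if_neg (by simp [hP]),
              if_pos (List.contains_iff_mem.mpr hT), ih]
          simp [hA, hP, hT]
        · simp only [List.foldl_cons]
          rw [if_neg (by simp [hA]),
              if_neg (by simp [hP]),
              if_neg (by simp [hT]), ih]
          simp [hA, hP, hT]

-- B's setdefault-then-append step equals A's insert-or-append step, for each kind
theorem pv_step_eq (kind : String) (fv : String → PySem.Dict String (List String))
    (hfv : ∀ v, pvFresh.modify kind [] (· ++ [v]) = fv v)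
    (d : PySem.Dict String (PySem.Dict String (List String))) (c v : String) :
    (d.setdefault c pvFresh).modify c pvFresh (fun entry => entry.modify kind [] (· ++ [v]))
    = (if d.contains c = false then d.insert c (fv v)
       else d.modify c PySem.Dict.empty (fun inner => inner.modify kind [] (· ++ [v]))) := by
  cases h : d.contains c with
  | false =>
    rw [PySem.Dict.setdefault_of_not_contains d pvFresh h, ← hfv v]
    simp [PySem.Dict.modify, PySem.Dict.getD_insert_self, PySem.Dict.insert_insert_self]
  | true =>
    rw [PySem.Dict.setdefault_of_contains d pvFresh h]
    simp only [PySem.Dict.modify]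
    rw [if_neg (by simp)]
    have : d.getD c pvFresh = d.getD c PySem.Dict.empty := by
      rcases hg : d.get? c with _ | w
      · rw [PySem.Dict.contains_eq_isSome_get?, hg] at h; simp at h
      · rw [PySem.Dict.getD_of_get?_eq_some d pvFresh hg,
            PySem.Dict.getD_of_get?_eq_some d PySem.Dict.empty hg]
    rw [this]

-- one B pass (category (kind, rels)) equals A's loop over the corresponding filtered list
theorem pv_pass_eq (kind : String) (rels : List String)
    (fv : String → PySem.Dict String (List String))
    (hfv : ∀ v, pvFresh.modify kind [] (· ++ [v]) = fv v)
    (ps : List (String × String × String))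
    (d : PySem.Dict String (PySem.Dict String (List String))) :
    ps.foldl
      (fun d p =>
        if rels.contains p.2.2 then
          (d.setdefault p.1 pvFresh).modify p.1 pvFresh
            (fun entry => entry.modify kind [] (· ++ [p.2.1]))
        else d) d
    = ((ps.filter (fun p => rels.contains p.2.2)).map (fun p => (p.1, p.2.1))).foldl
        (fun d cv =>
          if d.contains cv.1 = false then
            d.insert cv.1 (fv cv.2)
          else
            d.modify cv.1 PySem.Dict.empty (fun inner => inner.modify kind [] (· ++ [cv.2]))) d := by
  rw [List.foldl_map, List.foldl_filter]
  induction ps generalizing d with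
  | nil => rfl
  | cons p ps ih =>
    simp only [List.foldl_cons]
    rw [ih]
    cases hr : rels.contains p.2.2
    · simp
    · simp only [if_true]
      rw [pv_step_eq kind fv hfv]

-- the three fresh inner dicts A builds are pvFresh updated at the respective kind
theorem pv_fresh_agent (v : String) :
    pvFresh.modify "agent_verbs" [] (· ++ [v])
    = PySem.Dict.ofList [("agent_verbs", [v]), ("patient_verbs", []), ("attributes", [])] := by
  rfl
theorem pv_fresh_patient (v : String) :
    pvFresh.modify "patient_verbs" [] (· ++ [v])
    = PySem.Dict.ofList [("agent_verbs", []), ("patient_verbs", [v]), ("attributes", [])] := by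
  rfl
theorem pv_fresh_attr (v : String) :
    pvFresh.modify "attributes" [] (· ++ [v])
    = PySem.Dict.ofList [("agent_verbs", []), ("patient_verbs", []), ("attributes", [v])] := by
  rfl

-- ===== VERDICT (by name: the statement is the Claim_ definition above) =====
theorem get_character_description_spec : Claim_equal_get_character_description := by
  intro ps _
  unfold Spec_get_character_description
  unfold get_character_description get_character_description_alt split_description
  rw [pv_split_foldl]
  simp only [List.nil_append, List.foldl_cons, List.foldl_nil]
  rw [pv_pass_eq "agent_verbs" AGENT_VERBS _ pv_fresh_agent,
      pv_pass_eq "patient_verbs" PATIENT_VERBS _ pv_fresh_patient,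
      pv_pass_eq "attributes" ATTRIBUTE_TYPES _ pv_fresh_attr]
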